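-- pv_equiv track=rewrite | github.com/Cobord/HilbertScheme | src/word_funcs.py | crystal_e
-- ===== SOURCE A (Python) =====
-- from typing import List, Optional
--
-- Nat = int
--
-- def crystal_f(a_word: List[Nat], i: Nat) -> Optional[List[Nat]]:
--     """
--     f_i operator acting on a_word
--     """
--     num_open_parens = 0
--     last_non_cancelled_close_paren = None
--     for index, letter in enumerate(a_word):
--         if letter == i and num_open_parens == 0:
--             last_non_cancelled_close_paren = index
--         elif letter == i:
--             num_open_parens -= 1
--         elif letter == i+1:
--             num_open_parens += 1
--         else:
--             pass
--     if last_non_cancelled_close_paren is None: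
--         return None
--     new_word = a_word.copy()
--     new_word[last_non_cancelled_close_paren] += 1
--     return new_word
--
-- def crystal_e(a_word: List[Nat], i: Nat) -> Optional[List[Nat]]:
--     """
--     e_i operator acting on a_word
--     """
--     for index, letter in enumerate(a_word):
--         if letter == i+1:
--             temp_word = a_word.copy()
--             temp_word[index] -= 1
--             if crystal_f(temp_word, i) == a_word:
--                 return temp_word
--     return None
-- ===== SOURCE B (Python) =====
-- from typing import List, Optional
--
-- Nat = int
--
-- def crystal_e(a_word: List[Nat], i: Nat) -> Optional[List[Nat]]:
--     """
--     e_i operator acting on a_word: one right-to-left bracket-matching pass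
--     finds the leftmost unmatched i+1 and decrements it.
--     """
--     cnt = 0          # unmatched i's seen so far (to the right)
--     cand = None      # leftmost unmatched i+1 found so far
--     for index in range(len(a_word) - 1, -1, -1):
--         letter = a_word[index]
--         if letter == i:
--             cnt += 1
--         elif letter == i + 1:
--             if cnt > 0:
--                 cnt -= 1
--             else:
--                 cand = index
--     if cand is None:
--         return None
--     new_word = a_word.copy()
--     new_word[cand] -= 1
--     return new_word
-- ===== Notes on version B (the rewrite author's own statement) =====
-- stated objective: alternative
-- what changed: Replaced A's try-each-position search (for each i+1 position, decrement it and re-run the full crystal_f bracket scan to test inversion) by a single right-to-left bracket-matching pass that directly finds the leftmost unmatched i+1 and decrements it.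
import Mathlib
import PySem

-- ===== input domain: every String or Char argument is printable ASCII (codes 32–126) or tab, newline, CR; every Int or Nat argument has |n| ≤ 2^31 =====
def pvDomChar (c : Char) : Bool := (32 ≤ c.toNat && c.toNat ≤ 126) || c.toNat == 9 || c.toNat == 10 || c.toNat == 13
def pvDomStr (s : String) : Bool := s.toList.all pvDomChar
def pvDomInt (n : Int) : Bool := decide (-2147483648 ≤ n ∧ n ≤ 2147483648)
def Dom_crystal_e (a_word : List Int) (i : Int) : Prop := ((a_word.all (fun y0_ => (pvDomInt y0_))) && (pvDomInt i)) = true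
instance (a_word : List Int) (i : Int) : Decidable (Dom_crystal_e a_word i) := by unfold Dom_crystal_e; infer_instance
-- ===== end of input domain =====

-- B replaces A's try-each-position-then-re-run-crystal_f search by one right-to-left
-- bracket-matching pass finding the leftmost unmatched i+1 (objective: alternative).

-- ===== PORT A =====
-- the enumerate loop of crystal_f: explicit index, int open-paren counter, last recorded index
def fGo (i : Int) : List Int → Nat → Int → Option Nat → Option Nat
  | [], _, _, last => last
  | letter :: rest, index, opens, last =>
    if letter = i ∧ opens = 0 then fGo i rest (index + 1) opens (some index)
    else if letter = i then fGo i rest (index + 1) (opens - 1) last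
    else if letter = i + 1 then fGo i rest (index + 1) (opens + 1) last
    else fGo i rest (index + 1) opens last

def crystal_f (a_word : List Int) (i : Int) : Option (List Int) :=
  match fGo i a_word 0 0 none with
  | none => none
  | some j => some (a_word.modify j (· + 1))   -- new_word[j] += 1

-- the enumerate loop of crystal_e: first index whose decrement crystal_f maps back to a_word
def eGo (a_word : List Int) (i : Int) : List Int → Nat → Option (List Int)
  | [], _ => none
  | letter :: rest, index =>
    if letter = i + 1 then
      let temp_word := a_word.modify index (· - 1)   -- temp_word[index] -= 1
      if crystal_f temp_word i = some a_word then some temp_word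
      else eGo a_word i rest (index + 1)
    else eGo a_word i rest (index + 1)

def crystal_e (a_word : List Int) (i : Int) : Option (List Int) :=
  eGo a_word i a_word 0

-- ===== PORT B =====
-- right-to-left pass (the tail is processed first, then the head update is applied):
-- returns (number of unmatched i's seen, leftmost unmatched i+1 found so far)
def scanB (i : Int) : List Int → Nat → Nat × Option Nat
  | [], _ => (0, none)
  | letter :: rest, index =>
    let s := scanB i rest (index + 1)
    if letter = i then (s.1 + 1, s.2)
    else if letter = i + 1 then (if s.1 > 0 then (s.1 - 1, s.2) else (0, some index))
    else s

def crystal_e_alt (a_word : List Int) (i : Int) : Option (List Int) :=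
  match (scanB i a_word 0).2 with
  | none => none
  | some j => some (a_word.modify j (· - 1))   -- new_word[j] -= 1

-- ===== PRECONDITION & SPEC =====
def Spec_crystal_e (a_word : List Int) (i : Int) (out : Option (List Int)) : Prop := out = crystal_e_alt a_word i
instance (a_word : List Int) (i : Int) (out : Option (List Int)) : Decidable (Spec_crystal_e a_word i out) := by unfold Spec_crystal_e; infer_instance

-- ===== CLAIM (what is proved, stated in full; the proofs are below) =====
def Claim_equal_crystal_e : Prop := ∀ (a_word : List Int) (i : Int), Dom_crystal_e a_word i → Spec_crystal_e a_word i (crystal_e a_word i)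

-- ===== LEMMAS AND PROOFS =====

-- spec-side counters: number of i's unmatched under right-to-left matching (cntN),
-- and the open-paren count of a left scan started at o (opensN, saturating at 0)
def cntN (i : Int) : List Int → Nat
  | [] => 0
  | x :: t => if x = i then cntN i t + 1 else if x = i + 1 then cntN i t - 1 else cntN i t

def opensN (i : Int) : List Int → Nat → Nat
  | [], o => o
  | x :: t, o => if x = i then opensN i t (o - 1) else if x = i + 1 then opensN i t (o + 1) else opensN i t o

-- one-step unfolding equations for the four loop bodies and the two counters
lemma fGo_cons_rec {i x : Int} {t : List Int} {idx : Nat} {o : Int} {last : Option Nat}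
    (h1 : x = i) (h2 : o = 0) :
    fGo i (x :: t) idx o last = fGo i t (idx + 1) o (some idx) := by
  subst h1; subst h2; simp [fGo]

lemma fGo_cons_dec {i x : Int} {t : List Int} {idx : Nat} {o : Int} {last : Option Nat}
    (h1 : x = i) (h2 : o ≠ 0) :
    fGo i (x :: t) idx o last = fGo i t (idx + 1) (o - 1) last := by
  subst h1; simp [fGo, h2]

lemma fGo_cons_inc {i x : Int} {t : List Int} {idx : Nat} {o : Int} {last : Option Nat}
    (h1 : x ≠ i) (h2 : x = i + 1) :
    fGo i (x :: t) idx o last = fGo i t (idx + 1) (o + 1) last := by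
  subst h2; simp [fGo, h1]

lemma fGo_cons_skip {i x : Int} {t : List Int} {idx : Nat} {o : Int} {last : Option Nat}
    (h1 : x ≠ i) (h2 : x ≠ i + 1) :
    fGo i (x :: t) idx o last = fGo i t (idx + 1) o last := by
  simp [fGo, h1, h2]

lemma scanB_cons_eq {i x : Int} {u : List Int} {k : Nat} (h : x = i) :
    scanB i (x :: u) k = ((scanB i u (k + 1)).1 + 1, (scanB i u (k + 1)).2) := by
  subst h; simp [scanB]

lemma scanB_cons_pos {i x : Int} {u : List Int} {k : Nat}
    (h1 : x ≠ i) (h2 : x = i + 1) (hc : 0 < (scanB i u (k + 1)).1) :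
    scanB i (x :: u) k = ((scanB i u (k + 1)).1 - 1, (scanB i u (k + 1)).2) := by
  subst h2; simp [scanB, h1, hc]

lemma scanB_cons_zero {i x : Int} {u : List Int} {k : Nat}
    (h1 : x ≠ i) (h2 : x = i + 1) (hc : ¬ 0 < (scanB i u (k + 1)).1) :
    scanB i (x :: u) k = (0, some k) := by
  subst h2; simp [scanB, h1, hc]

lemma scanB_cons_skip {i x : Int} {u : List Int} {k : Nat}
    (h1 : x ≠ i) (h2 : x ≠ i + 1) :
    scanB i (x :: u) k = scanB i u (k + 1) := by
  simp [scanB, h1, h2]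

lemma eGo_cons_hit {a : List Int} {i x : Int} {rest : List Int} {idx : Nat}
    (h1 : x = i + 1) (h2 : crystal_f (a.modify idx (· - 1)) i = some a) :
    eGo a i (x :: rest) idx = some (a.modify idx (· - 1)) := by
  subst h1; simp [eGo, h2]

lemma eGo_cons_miss {a : List Int} {i x : Int} {rest : List Int} {idx : Nat}
    (h1 : x = i + 1) (h2 : ¬ crystal_f (a.modify idx (· - 1)) i = some a) :
    eGo a i (x :: rest) idx = eGo a i rest (idx + 1) := by
  subst h1; simp [eGo, h2]

lemma eGo_cons_skip {a : List Int} {i x : Int} {rest : List Int} {idx : Nat}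
    (h1 : x ≠ i + 1) :
    eGo a i (x :: rest) idx = eGo a i rest (idx + 1) := by
  simp [eGo, h1]

lemma cntN_cons_eq {i x : Int} {t : List Int} (h : x = i) :
    cntN i (x :: t) = cntN i t + 1 := by
  subst h; simp [cntN]

lemma cntN_cons_succ {i x : Int} {t : List Int} (h1 : x ≠ i) (h2 : x = i + 1) :
    cntN i (x :: t) = cntN i t - 1 := by
  subst h2; simp [cntN, h1]

lemma cntN_cons_skip {i x : Int} {t : List Int} (h1 : x ≠ i) (h2 : x ≠ i + 1) :
    cntN i (x :: t) = cntN i t := by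
  simp [cntN, h1, h2]

lemma opensN_cons_eq {i x : Int} {t : List Int} {o : Nat} (h : x = i) :
    opensN i (x :: t) o = opensN i t (o - 1) := by
  subst h; simp [opensN]

lemma opensN_cons_succ {i x : Int} {t : List Int} {o : Nat} (h1 : x ≠ i) (h2 : x = i + 1) :
    opensN i (x :: t) o = opensN i t (o + 1) := by
  subst h2; simp [opensN, h1]

lemma opensN_cons_skip {i x : Int} {t : List Int} {o : Nat} (h1 : x ≠ i) (h2 : x ≠ i + 1) :
    opensN i (x :: t) o = opensN i t o := by
  simp [opensN, h1, h2]

lemma modify_cancel (a : List Int) (j : Nat) (v : Int) (hj : a[j]? = some v) :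
    (a.modify j (· - 1)).modify j (· + 1) = a := by
  apply List.ext_getElem?
  intro n
  by_cases h : j = n
  · subst h
    rw [List.getElem?_modify, List.getElem?_modify, hj]
    simp
  · rw [List.getElem?_modify, List.getElem?_modify]
    cases a[n]? <;> simp [h]

lemma getElem?_modify_ne (a : List Int) (f : Int → Int) (j n : Nat) (h : j ≠ n) :
    (a.modify j f)[n]? = a[n]? := by
  rw [List.getElem?_modify]
  cases a[n]? <;> simp [h]

-- opensN started at o, expressed from the start at 0
lemma opensN_eq (i : Int) : ∀ (u : List Int) (o : Nat),
    opensN i u o = opensN i u 0 + (o - cntN i u) := by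
  intro u
  induction u with
  | nil => intro o; simp [opensN, cntN]
  | cons x t ih =>
    intro o
    by_cases hx : x = i
    · rw [opensN_cons_eq hx, opensN_cons_eq hx, cntN_cons_eq hx, ih (o - 1), ih (0 - 1)]
      omega
    · by_cases hx1 : x = i + 1
      · rw [opensN_cons_succ hx hx1, opensN_cons_succ hx hx1, cntN_cons_succ hx hx1,
            ih (o + 1), ih (0 + 1)]
        omega
      · rw [opensN_cons_skip hx hx1, opensN_cons_skip hx hx1, cntN_cons_skip hx hx1]
        exact ih o

lemma cntN_append (i : Int) : ∀ (u v : List Int),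
    cntN i (u ++ v) = cntN i u + (cntN i v - opensN i u 0) := by
  intro u v
  induction u with
  | nil => simp [cntN, opensN]
  | cons x t ih =>
    by_cases hx : x = i
    · rw [List.cons_append, cntN_cons_eq hx, cntN_cons_eq hx, opensN_cons_eq hx, ih,
          show ((0 : Nat) - 1) = 0 from rfl]
      omega
    · by_cases hx1 : x = i + 1
      · rw [List.cons_append, cntN_cons_succ hx hx1, cntN_cons_succ hx hx1,
            opensN_cons_succ hx hx1, ih, opensN_eq i t (0 + 1)]
        omega
      · rw [List.cons_append, cntN_cons_skip hx hx1, cntN_cons_skip hx hx1,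
            opensN_cons_skip hx hx1, ih]

-- splitting cntN at a known i+1 letter whose suffix has no unmatched i
lemma cnt_split (i : Int) (u : List Int) (j : Nat)
    (h : u[j]? = some (i + 1))
    (h2 : cntN i (u.drop (j + 1)) = 0)
    (h3 : opensN i (u.take j) 0 = 0) :
    cntN i u = cntN i (u.take j) := by
  obtain ⟨hlt, hv⟩ := List.getElem?_eq_some_iff.mp h
  have hsplit : u = u.take j ++ (i + 1) :: u.drop (j + 1) := by
    conv_lhs => rw [← List.take_append_drop j u]
    rw [List.drop_eq_getElem_cons hlt, hv]
  conv_lhs => rw [hsplit]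
  rw [cntN_append, cntN_cons_succ (by omega) rfl, h2, h3]
  omega

-- the fGo loop either keeps its accumulator or records an index ≥ the current one
lemma fGo_range (i : Int) : ∀ (u : List Int) (idx : Nat) (o : Int) (last : Option Nat),
    fGo i u idx o last = last ∨ ∃ m, idx ≤ m ∧ fGo i u idx o last = some m := by
  intro u
  induction u with
  | nil => intro idx o last; left; rfl
  | cons x t ih =>
    intro idx o last
    by_cases hx : x = i
    · by_cases ho0 : o = 0
      · rw [fGo_cons_rec hx ho0]
        rcases ih (idx + 1) o (some idx) with h | ⟨m, hm, h⟩
        · right; exact ⟨idx, le_refl _, h⟩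
        · right; exact ⟨m, by omega, h⟩
      · rw [fGo_cons_dec hx ho0]
        rcases ih (idx + 1) (o - 1) last with h | ⟨m, hm, h⟩
        · left; exact h
        · right; exact ⟨m, by omega, h⟩
    · by_cases hx1 : x = i + 1
      · rw [fGo_cons_inc hx hx1]
        rcases ih (idx + 1) (o + 1) last with h | ⟨m, hm, h⟩
        · left; exact h
        · right; exact ⟨m, by omega, h⟩
      · rw [fGo_cons_skip hx hx1]
        rcases ih (idx + 1) o last with h | ⟨m, hm, h⟩
        · left; exact h
        · right; exact ⟨m, by omega, h⟩

-- enough opens to absorb every unmatched i: nothing is recorded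
lemma fGo_norec (i : Int) : ∀ (u : List Int) (idx : Nat) (o : Int) (last : Option Nat),
    0 ≤ o → (cntN i u : Int) ≤ o → fGo i u idx o last = last := by
  intro u
  induction u with
  | nil => intro idx o last _ _; rfl
  | cons x t ih =>
    intro idx o last ho hc
    by_cases hx : x = i
    · rw [cntN_cons_eq hx] at hc
      have ho0 : o ≠ 0 := by omega
      rw [fGo_cons_dec hx ho0]
      exact ih (idx + 1) (o - 1) last (by omega) (by omega)
    · by_cases hx1 : x = i + 1
      · rw [cntN_cons_succ hx hx1] at hc
        rw [fGo_cons_inc hx hx1]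
        exact ih (idx + 1) (o + 1) last (by omega) (by omega)
      · rw [cntN_cons_skip hx hx1] at hc
        rw [fGo_cons_skip hx hx1]
        exact ih (idx + 1) o last ho hc

-- more unmatched i's than opens: some index ≥ idx ends up recorded
lemma fGo_rec (i : Int) : ∀ (u : List Int) (idx : Nat) (o : Int) (last : Option Nat),
    0 ≤ o → o < (cntN i u : Int) → ∃ m, idx ≤ m ∧ fGo i u idx o last = some m := by
  intro u
  induction u with
  | nil => intro idx o last ho hc; simp [cntN] at hc; omega
  | cons x t ih =>
    intro idx o last ho hc
    by_cases hx : x = i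
    · rw [cntN_cons_eq hx] at hc
      by_cases ho0 : o = 0
      · rw [fGo_cons_rec hx ho0]
        rcases fGo_range i t (idx + 1) o (some idx) with h | ⟨m, hm, h⟩
        · exact ⟨idx, le_refl _, h⟩
        · exact ⟨m, by omega, h⟩
      · rw [fGo_cons_dec hx ho0]
        rcases ih (idx + 1) (o - 1) last (by omega) (by omega) with ⟨m, hm, h⟩
        exact ⟨m, by omega, h⟩
    · by_cases hx1 : x = i + 1
      · rw [cntN_cons_succ hx hx1] at hc
        rw [fGo_cons_inc hx hx1]
        rcases ih (idx + 1) (o + 1) last (by omega) (by omega) with ⟨m, hm, h⟩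
        exact ⟨m, by omega, h⟩
      · rw [cntN_cons_skip hx hx1] at hc
        rw [fGo_cons_skip hx hx1]
        rcases ih (idx + 1) o last ho hc with ⟨m, hm, h⟩
        exact ⟨m, by omega, h⟩

-- master characterisation of A's inner check: with a[j] = i+1 decremented, crystal_f's scan
-- records exactly j iff the prefix closes all its opens and the suffix has no unmatched i
lemma Mlem (i : Int) : ∀ (a : List Int) (j idx : Nat) (o : Int) (last : Option Nat),
    0 ≤ o → (∀ k, last = some k → k < idx) → a[j]? = some (i + 1) →
    (fGo i (a.modify j (· - 1)) idx o last = some (idx + j) ↔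
      (opensN i (a.take j) o.toNat = 0 ∧ cntN i (a.drop (j + 1)) = 0)) := by
  intro a
  induction a with
  | nil => intro j idx o last _ _ hj; simp at hj
  | cons x t ih =>
    intro j idx o last ho hlast hj
    cases j with
    | zero =>
      have hx : x = i + 1 := by simpa using hj
      subst hx
      simp only [List.modify_zero_cons]
      rw [show (i + 1 - 1 : Int) = i from by ring, List.take_zero,
          List.drop_succ_cons, List.drop_zero]
      by_cases ho0 : o = 0
      · subst ho0
        rw [fGo_cons_rec rfl rfl]
        constructor
        · intro h
          refine ⟨rfl, ?_⟩
          by_contra hcc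
          rcases fGo_rec i t (idx + 1) 0 (some idx) (by omega) (by omega) with ⟨m, hm, hh⟩
          rw [hh] at h
          injection h with h'
          omega
        · rintro ⟨-, h2⟩
          rw [fGo_norec i t (idx + 1) 0 (some idx) (by omega) (by omega)]
          simp
      · rw [fGo_cons_dec rfl ho0]
        constructor
        · intro h
          exfalso
          rcases fGo_range i t (idx + 1) (o - 1) last with hh | ⟨m, hm, hh⟩
          · rw [hh] at h
            have := hlast _ h
            omega
          · rw [hh] at h
            injection h with h'
            omega
        · rintro ⟨h1, -⟩
          exfalso
          simp only [opensN] at h1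
          omega
    | succ j' =>
      rw [List.getElem?_cons_succ] at hj
      rw [List.modify_succ_cons, List.take_succ_cons, List.drop_succ_cons,
          show idx + (j' + 1) = (idx + 1) + j' from by omega]
      by_cases hx : x = i
      · by_cases ho0 : o = 0
        · rw [fGo_cons_rec hx ho0, opensN_cons_eq hx,
              ih j' (idx + 1) o (some idx) ho (by intro k hk; injection hk with h'; omega) hj]
          subst ho0
          exact Iff.rfl
        · rw [fGo_cons_dec hx ho0, opensN_cons_eq hx,
              ih j' (idx + 1) (o - 1) last (by omega)
                (by intro k hk; have := hlast k hk; omega) hj,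
              show (o - 1).toNat = o.toNat - 1 from by omega]
      · by_cases hx1 : x = i + 1
        · rw [fGo_cons_inc hx hx1, opensN_cons_succ hx hx1,
              ih j' (idx + 1) (o + 1) last (by omega)
                (by intro k hk; have := hlast k hk; omega) hj,
              show (o + 1).toNat = o.toNat + 1 from by omega]
        · rw [fGo_cons_skip hx hx1, opensN_cons_skip hx hx1,
              ih j' (idx + 1) o last ho
                (by intro k hk; have := hlast k hk; omega) hj]

-- scanB bookkeeping: its counter is cntN, its candidate lies in [index, index + length)
lemma scanB_fst (i : Int) : ∀ (t : List Int) (k : Nat), (scanB i t k).1 = cntN i t := by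
  intro t
  induction t with
  | nil => intro k; rfl
  | cons x u ih =>
    intro k
    by_cases hx : x = i
    · rw [scanB_cons_eq hx, cntN_cons_eq hx]
      dsimp only
      rw [ih]
    · by_cases hx1 : x = i + 1
      · by_cases hc : 0 < (scanB i u (k + 1)).1
        · rw [scanB_cons_pos hx hx1 hc, cntN_cons_succ hx hx1]
          dsimp only
          rw [ih]
        · rw [scanB_cons_zero hx hx1 hc, cntN_cons_succ hx hx1]
          rw [ih] at hc
          dsimp only
          omega
      · rw [scanB_cons_skip hx hx1, cntN_cons_skip hx hx1, ih]

lemma scanB_ge (i : Int) : ∀ (t : List Int) (k m : Nat), (scanB i t k).2 = some m → k ≤ m := by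
  intro t
  induction t with
  | nil => intro k m h; simp [scanB] at h
  | cons x u ih =>
    intro k m h
    by_cases hx : x = i
    · rw [scanB_cons_eq hx] at h
      have := ih (k + 1) m h
      omega
    · by_cases hx1 : x = i + 1
      · by_cases hc : 0 < (scanB i u (k + 1)).1
        · rw [scanB_cons_pos hx hx1 hc] at h
          have := ih (k + 1) m h
          omega
        · rw [scanB_cons_zero hx hx1 hc] at h
          injection h with h'
          omega
      · rw [scanB_cons_skip hx hx1] at h
        have := ih (k + 1) m h
        omega

lemma scanB_lt (i : Int) : ∀ (t : List Int) (k m : Nat), (scanB i t k).2 = some m → m < k + t.length := by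
  intro t
  induction t with
  | nil => intro k m h; simp [scanB] at h
  | cons x u ih =>
    intro k m h
    rw [List.length_cons]
    by_cases hx : x = i
    · rw [scanB_cons_eq hx] at h
      have := ih (k + 1) m h
      omega
    · by_cases hx1 : x = i + 1
      · by_cases hc : 0 < (scanB i u (k + 1)).1
        · rw [scanB_cons_pos hx hx1 hc] at h
          have := ih (k + 1) m h
          omega
        · rw [scanB_cons_zero hx hx1 hc] at h
          injection h with h'
          omega
      · rw [scanB_cons_skip hx hx1] at h
        have := ih (k + 1) m h
        omega

-- characterisation of B's scan: it points at j iff a[j] = i+1, the prefix closes, the suffix has no unmatched i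
lemma Elem (i : Int) : ∀ (t : List Int) (j k : Nat),
    ((scanB i t k).2 = some (k + j)) ↔
      (t[j]? = some (i + 1) ∧ opensN i (t.take j) 0 = 0 ∧ cntN i (t.drop (j + 1)) = 0) := by
  intro t
  induction t with
  | nil => intro j k; simp [scanB]
  | cons x u ih =>
    intro j k
    by_cases hx : x = i
    · rw [scanB_cons_eq hx]
      dsimp only
      cases j with
      | zero =>
        constructor
        · intro h
          exfalso
          have := scanB_ge i u (k + 1) (k + 0) h
          omega
        · rintro ⟨h, -⟩
          exfalso
          rw [List.getElem?_cons_zero] at h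
          injection h with h'
          omega
      | succ j' =>
        rw [List.getElem?_cons_succ, List.take_succ_cons, List.drop_succ_cons,
            opensN_cons_eq hx, show k + (j' + 1) = (k + 1) + j' from by omega]
        exact ih j' (k + 1)
    · by_cases hx1 : x = i + 1
      · have hcn : (scanB i u (k + 1)).1 = cntN i u := scanB_fst i u (k + 1)
        by_cases hc : 0 < (scanB i u (k + 1)).1
        · rw [scanB_cons_pos hx hx1 hc]
          dsimp only
          rw [hcn] at hc
          cases j with
          | zero =>
            rw [List.getElem?_cons_zero, List.drop_succ_cons, List.drop_zero]
            constructor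
            · intro h
              exfalso
              have := scanB_ge i u (k + 1) (k + 0) h
              omega
            · rintro ⟨-, -, h3⟩
              exfalso
              omega
          | succ j' =>
            rw [List.getElem?_cons_succ, List.take_succ_cons, List.drop_succ_cons,
                opensN_cons_succ hx hx1, show k + (j' + 1) = (k + 1) + j' from by omega,
                ih j' (k + 1)]
            constructor
            · rintro ⟨h1, h2, h3⟩
              refine ⟨h1, ?_, h3⟩
              rw [opensN_eq]
              have hcnt : cntN i u = cntN i (u.take j') := cnt_split i u j' h1 h3 h2
              omega
            · rintro ⟨h1, h2, h3⟩
              rw [opensN_eq] at h2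
              exact ⟨h1, by omega, h3⟩
        · rw [scanB_cons_zero hx hx1 hc]
          dsimp only
          rw [hcn] at hc
          cases j with
          | zero =>
            rw [List.getElem?_cons_zero, List.drop_succ_cons, List.drop_zero]
            constructor
            · intro _
              refine ⟨by rw [hx1], rfl, by omega⟩
            · intro _
              rw [show k + 0 = k from by omega]
          | succ j' =>
            rw [List.getElem?_cons_succ, List.take_succ_cons, List.drop_succ_cons,
                opensN_cons_succ hx hx1]
            constructor
            · intro h
              exfalso
              injection h with h'
              omega
            · rintro ⟨h1, h2, h3⟩
              exfalso
              rw [opensN_eq] at h2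
              have h20 : opensN i (u.take j') 0 = 0 := by omega
              have hge : 1 ≤ cntN i (u.take j') := by omega
              have hcnt : cntN i u = cntN i (u.take j') := cnt_split i u j' h1 h3 h20
              omega
      · rw [scanB_cons_skip hx hx1]
        cases j with
        | zero =>
          constructor
          · intro h
            exfalso
            have := scanB_ge i u (k + 1) (k + 0) h
            omega
          · rintro ⟨h, -⟩
            exfalso
            rw [List.getElem?_cons_zero] at h
            injection h with h'
            exact hx1 h'
        | succ j' =>
          rw [List.getElem?_cons_succ, List.take_succ_cons, List.drop_succ_cons,
              opensN_cons_skip hx hx1, show k + (j' + 1) = (k + 1) + j' from by omega]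
          exact ih j' (k + 1)

-- A's inner test at position j succeeds iff fGo records exactly j
lemma Achar (a : List Int) (i : Int) (j : Nat) (hj : a[j]? = some (i + 1)) :
    (crystal_f (a.modify j (· - 1)) i = some a) ↔ fGo i (a.modify j (· - 1)) 0 0 none = some j := by
  unfold crystal_f
  cases h : fGo i (a.modify j (· - 1)) 0 0 none with
  | none => simp
  | some k =>
    show some ((a.modify j (· - 1)).modify k (· + 1)) = some a ↔ some k = some j
    constructor
    · intro heq
      have heq' : (a.modify j (· - 1)).modify k (· + 1) = a := by injection heq
      by_cases hkj : k = j
      · rw [hkj]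
      · exfalso
        have h1 : (a.modify j (· - 1))[j]? = a[j]? := by
          calc (a.modify j (· - 1))[j]?
              = ((a.modify j (· - 1)).modify k (· + 1))[j]? :=
                (getElem?_modify_ne _ _ _ _ hkj).symm
            _ = a[j]? := by rw [heq']
        rw [List.getElem?_modify] at h1
        rw [hj] at h1
        simp at h1
    · intro hk
      have hkj : k = j := by injection hk
      subst hkj
      rw [modify_cancel a k (i + 1) hj]

-- combined: A's test at j holds iff B's scan points at j
lemma Qchar (a : List Int) (i : Int) (j : Nat) :
    (a[j]? = some (i + 1) ∧ crystal_f (a.modify j (· - 1)) i = some a) ↔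
      (scanB i a 0).2 = some j := by
  have hj0 : (some j : Option Nat) = some (0 + j) := by rw [Nat.zero_add]
  by_cases hg : a[j]? = some (i + 1)
  · rw [hj0, Elem i a j 0]
    constructor
    · rintro ⟨-, hc⟩
      have hf := (Achar a i j hg).mp hc
      have hM := (Mlem i a j 0 0 none (by omega) (by intro k hk; simp at hk) hg).mp
        (by rw [Nat.zero_add]; exact hf)
      exact ⟨hg, by simpa using hM.1, hM.2⟩
    · rintro ⟨-, h2, h3⟩
      refine ⟨hg, (Achar a i j hg).mpr ?_⟩
      have hM := (Mlem i a j 0 0 none (by omega) (by intro k hk; simp at hk) hg).mpr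
        ⟨by simpa using h2, h3⟩
      rw [Nat.zero_add] at hM
      exact hM
  · constructor
    · rintro ⟨h, -⟩
      exact absurd h hg
    · intro h
      exfalso
      rw [hj0, Elem i a j 0] at h
      exact hg h.1

-- walking A's search when B's scan found the (unique) index m
lemma eGo_some (a : List Int) (i : Int) : ∀ (u : List Int) (idx m : Nat),
    a.drop idx = u → (scanB i a 0).2 = some m → idx ≤ m →
    eGo a i u idx = some (a.modify m (· - 1)) := by
  intro u
  induction u with
  | nil =>
    intro idx m hdrop hm hle
    exfalso
    have hlen : a.length ≤ idx := List.drop_eq_nil_iff.mp hdrop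
    have := scanB_lt i a 0 m hm
    omega
  | cons x rest ih =>
    intro idx m hdrop hm hle
    have hget : a[idx]? = some x := by
      have h0 : (a.drop idx)[0]? = some x := by rw [hdrop]; rfl
      rwa [List.getElem?_drop, Nat.add_zero] at h0
    have hdrop' : a.drop (idx + 1) = rest := by
      rw [show idx + 1 = idx + 1 from rfl, ← List.drop_drop, hdrop]
      rfl
    by_cases hx : x = i + 1
    · by_cases hc : crystal_f (a.modify idx (· - 1)) i = some a
      · have hq : (scanB i a 0).2 = some idx :=
          (Qchar a i idx).mp ⟨by rw [hget, hx], hc⟩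
        rw [hm] at hq
        have hmi : m = idx := by injection hq
        subst hmi
        exact eGo_cons_hit hx hc
      · have hne : m ≠ idx := by
          intro hh
          subst hh
          exact hc ((Qchar a i m).mpr hm).2
        rw [eGo_cons_miss hx hc]
        exact ih (idx + 1) m hdrop' hm (by omega)
    · have hne : m ≠ idx := by
        intro hh
        subst hh
        have hq := (Qchar a i m).mpr hm
        rw [hget] at hq
        have : x = i + 1 := by injection hq.1
        exact hx this
      rw [eGo_cons_skip hx]
      exact ih (idx + 1) m hdrop' hm (by omega)

-- walking A's search when B's scan found nothing
lemma eGo_none (a : List Int) (i : Int) : ∀ (u : List Int) (idx : Nat),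
    a.drop idx = u → (scanB i a 0).2 = none →
    eGo a i u idx = none := by
  intro u
  induction u with
  | nil => intro idx _ _; rfl
  | cons x rest ih =>
    intro idx hdrop hnone
    have hget : a[idx]? = some x := by
      have h0 : (a.drop idx)[0]? = some x := by rw [hdrop]; rfl
      rwa [List.getElem?_drop, Nat.add_zero] at h0
    have hdrop' : a.drop (idx + 1) = rest := by
      rw [← List.drop_drop, hdrop]
      rfl
    by_cases hx : x = i + 1
    · have hc : ¬ crystal_f (a.modify idx (· - 1)) i = some a := by
        intro hc
        have hq : (scanB i a 0).2 = some idx :=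
          (Qchar a i idx).mp ⟨by rw [hget, hx], hc⟩
        rw [hnone] at hq
        simp at hq
      rw [eGo_cons_miss hx hc]
      exact ih (idx + 1) hdrop' hnone
    · rw [eGo_cons_skip hx]
      exact ih (idx + 1) hdrop' hnone

-- ===== VERDICT (by name: the statement is the Claim_ definition above) =====
theorem crystal_e_spec : Claim_equal_crystal_e := by
  unfold Claim_equal_crystal_e
  intro a_word i _
  unfold Spec_crystal_e crystal_e crystal_e_alt
  cases h : (scanB i a_word 0).2 with
  | none =>
    rw [eGo_none a_word i a_word 0 List.drop_zero h]
  | some m =>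
    rw [eGo_some a_word i a_word 0 m List.drop_zero h (Nat.zero_le m)]
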